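-- pv_equiv track=rewrite | github.com/FlintLeng/rpi-inference | tools/distill_to_rpi.py | learn_routes
-- ===== SOURCE A (Python) =====
-- from collections import defaultdict
--
-- CELLS_PER_BANK = 128
--
-- MAX_ROUTES = 16
--
-- def learn_routes(labels_per_bank, n_cells_per_bank=CELLS_PER_BANK):
--     """Learn transition routes between cells from sequential activation patterns."""
--     routes = defaultdict(lambda: defaultdict(int))
--
--     for bank_labels in labels_per_bank:
--         for i in range(len(bank_labels) - 1):
--             src = bank_labels[i]
--             dst = bank_labels[i + 1]
--             if src != dst:
--                 routes[src][dst] += 1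
--
--     # Keep top MAX_ROUTES per cell
--     cell_routes = {}
--     for src, dsts in routes.items():
--         sorted_dsts = sorted(dsts.items(), key=lambda x: -x[1])[:MAX_ROUTES]
--         cell_routes[src] = sorted_dsts
--
--     return cell_routes
-- ===== SOURCE B (Python) =====
-- CELLS_PER_BANK = 128
--
-- MAX_ROUTES = 16
--
-- def learn_routes(labels_per_bank, n_cells_per_bank=CELLS_PER_BANK):
--     """Learn routes by direct scanning, with no counting dicts: flatten all
--     transitions, then for each first-seen source count each destination by
--     scanning the flat transition list."""
--     steps = [(a, b)
--              for bank in labels_per_bank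
--              for a, b in zip(bank, bank[1:])
--              if a != b]
--     result = {}
--     for src, _ in steps:
--         if src in result:
--             continue
--         dsts = []
--         for s, d in steps:
--             if s == src and d not in dsts:
--                 dsts.append(d)
--         ranked = sorted([(d, steps.count((src, d))) for d in dsts],
--                         key=lambda x: -x[1])
--         result[src] = ranked[:MAX_ROUTES]
--     return result
-- ===== Notes on version B (the rewrite author's own statement) =====
-- stated objective: alternative
-- what changed: A incrementally counts transitions into a nested defaultdict-of-defaultdicts via an index loop per bank and sorts each inner dict's items; B uses no counting structure at all: it flattens all transitions once with zip, then for each first-seen source collects that source's distinct destinations by a dedup scan and counts each destination with list.count over the flat transition list, sorting and truncating per source.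
import Mathlib
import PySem

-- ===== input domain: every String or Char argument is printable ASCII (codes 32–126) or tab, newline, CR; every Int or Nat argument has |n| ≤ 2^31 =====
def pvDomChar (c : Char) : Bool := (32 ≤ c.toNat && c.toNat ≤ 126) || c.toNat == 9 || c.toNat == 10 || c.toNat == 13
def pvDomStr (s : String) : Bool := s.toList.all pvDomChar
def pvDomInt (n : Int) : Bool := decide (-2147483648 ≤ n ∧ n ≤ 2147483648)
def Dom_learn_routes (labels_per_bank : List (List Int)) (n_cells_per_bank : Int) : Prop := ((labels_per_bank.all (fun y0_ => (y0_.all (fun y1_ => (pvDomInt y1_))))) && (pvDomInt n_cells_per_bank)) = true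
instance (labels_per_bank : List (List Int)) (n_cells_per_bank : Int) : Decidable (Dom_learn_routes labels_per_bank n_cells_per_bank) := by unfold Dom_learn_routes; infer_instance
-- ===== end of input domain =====

-- B replaces A's nested counting dicts by direct list scanning: flatten the transitions once,
-- then for each first-seen source count each destination with plain list scans (objective: alternative).

-- ===== PORT A =====
def learn_routes (labels_per_bank : List (List Int)) (n_cells_per_bank : Int) : List (Int × List (Int × Int)) :=
  let routes : PySem.Dict Int (PySem.Dict Int Int) :=
    labels_per_bank.foldl (fun routes bank =>
      (PySem.List.pyRange 0 (PySem.List.len bank - 1) 1).foldl (fun routes i =>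
        let src := PySem.List.pyGetD bank i 0
        let dst := PySem.List.pyGetD bank (i + 1) 0
        if src ≠ dst then
          routes.modify src PySem.Dict.empty (fun inner => inner.modify dst 0 (· + 1))
        else routes) routes) PySem.Dict.empty
  let cell_routes : PySem.Dict Int (List (Int × Int)) :=
    routes.items.foldl (fun cr sd =>
      cr.insert sd.1 (PySem.List.slice (PySem.List.sorted sd.2.items (fun x => -x.2) false) none (some 16)))
      PySem.Dict.empty
  cell_routes.items

-- ===== PORT B =====
def learn_routes_alt (labels_per_bank : List (List Int)) (n_cells_per_bank : Int) : List (Int × List (Int × Int)) :=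
  let steps : List (Int × Int) :=
    labels_per_bank.flatMap (fun bank =>
      (bank.zip (PySem.List.slice bank (some 1) none)).filter (fun p => p.1 != p.2))
  let result : PySem.Dict Int (List (Int × Int)) :=
    steps.foldl (fun result p =>
      if result.contains p.1 then result
      else
        let dsts : List Int :=
          steps.foldl (fun dsts q => if q.1 = p.1 ∧ q.2 ∉ dsts then dsts ++ [q.2] else dsts) []
        let ranked :=
          PySem.List.sorted (dsts.map (fun d => (d, (PySem.List.count steps (p.1, d) : Int))))
            (fun x => -x.2) false
        result.insert p.1 (PySem.List.slice ranked none (some 16)))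
      PySem.Dict.empty
  result.items

-- ===== PRECONDITION & SPEC =====
def Spec_learn_routes (labels_per_bank : List (List Int)) (n_cells_per_bank : Int) (out : List (Int × List (Int × Int))) : Prop := out = learn_routes_alt labels_per_bank n_cells_per_bank
instance (labels_per_bank : List (List Int)) (n_cells_per_bank : Int) (out : List (Int × List (Int × Int))) : Decidable (Spec_learn_routes labels_per_bank n_cells_per_bank out) := by unfold Spec_learn_routes; infer_instance

-- ===== CLAIM (what is proved, stated in full; the proofs are below) =====
def Claim_equal_learn_routes : Prop := ∀ (labels_per_bank : List (List Int)) (n_cells_per_bank : Int), Dom_learn_routes labels_per_bank n_cells_per_bank → Spec_learn_routes labels_per_bank n_cells_per_bank (learn_routes labels_per_bank n_cells_per_bank)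

-- ===== LEMMAS AND PROOFS =====

-- the flat list of transitions (src ≠ dst), in traversal order; both ports reduce to it
def pvPairs (labels_per_bank : List (List Int)) : List (Int × Int) :=
  labels_per_bank.flatMap (fun bank => (bank.zip bank.tail).filter (fun p => p.1 != p.2))

-- adjacent-pair view of A's index loop
lemma pv_zip_adj (bank : List Int) :
    (PySem.List.pyRange 0 (PySem.List.len bank - 1) 1).map
      (fun i => (PySem.List.pyGetD bank i 0, PySem.List.pyGetD bank (i + 1) 0))
    = bank.zip bank.tail := by
  rw [PySem.List.pyRange_one, List.map_map]
  apply List.ext_getElem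
  · simp [PySem.List.len_eq, List.length_zip]
  · intro i h1 h2
    simp only [List.getElem_map, List.getElem_range, Function.comp, zero_add]
    have hi : i < bank.length - 1 := by
      simp [PySem.List.len_eq] at h1; omega
    have h3 : (i : Int) + 1 = ((i + 1 : Nat) : Int) := by push_cast; ring
    rw [List.getElem_zip]
    simp only [PySem.List.pyGetD_natCast, h3]
    rw [List.getElem_tail]
    congr 1
    · rw [List.getD_eq_getElem _ _ (by omega)]
    · rw [List.getD_eq_getElem _ _ (by omega)]

-- a fold over the banks of folds over each bank's transitions is one fold over all transitions
lemma pv_foldl_flatMap {α β γ : Type} (l : List α) (g : α → List β) (F : γ → β → γ) (init : γ) :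
    l.foldl (fun r x => (g x).foldl F r) init = (l.flatMap g).foldl F init := by
  induction l generalizing init with
  | nil => rfl
  | cons a t ih => simp [List.foldl_append, ih]

-- restriction of a keyed modify-fold to a single key
lemma pv_getD_foldl_modify_key {κ ν β : Type} [BEq κ] [LawfulBEq κ] [DecidableEq κ]
    (l : List β) (key : β → κ) (d0 : ν) (f : β → ν → ν) (d : PySem.Dict κ ν) (s : κ) :
    (l.foldl (fun d x => d.modify (key x) d0 (f x)) d).getD s d0
      = (l.filter (fun x => key x == s)).foldl (fun v x => f x v) (d.getD s d0) := by
  induction l generalizing d with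
  | nil => rfl
  | cons x t ih =>
    simp only [List.foldl_cons, List.filter_cons]
    by_cases h : key x = s
    · subst h
      simp only [beq_self_eq_true, if_pos, List.foldl_cons]
      rw [ih, PySem.Dict.getD_modify_self]
    · have hb : (key x == s) = false := by simp [h]
      rw [hb]
      simp only [Bool.false_eq_true, if_false]
      rw [ih, PySem.Dict.getD_modify, if_neg (fun hs => h hs.symm)]

-- counting the pair (s, d) is counting d among the dst's at source s
lemma pv_count_pair {α β : Type} [BEq α] [LawfulBEq α] [DecidableEq α] [BEq β] [LawfulBEq β] [DecidableEq β] (l : List (α × β)) (s : α) (d : β) :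
    l.count (s, d) = ((l.filter (fun p => p.1 == s)).map Prod.snd).count d := by
  induction l with
  | nil => rfl
  | cons p t ih =>
    rcases p with ⟨a, b⟩
    by_cases h1 : a = s
    · subst h1
      by_cases h2 : b = d
      · subst h2; simp [ih]
      · simp [ih, h2, Prod.ext_iff]
    · simp [ih, h1, Prod.ext_iff]

-- A's nested loops build exactly the fold of the nested update over pvPairs
lemma pv_routes_eq (labels_per_bank : List (List Int)) :
    labels_per_bank.foldl (fun routes bank =>
      (PySem.List.pyRange 0 (PySem.List.len bank - 1) 1).foldl (fun routes i =>
        let src := PySem.List.pyGetD bank i 0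
        let dst := PySem.List.pyGetD bank (i + 1) 0
        if src ≠ dst then
          routes.modify src PySem.Dict.empty (fun inner => inner.modify dst (0 : Int) (· + 1))
        else routes) routes) (PySem.Dict.empty : PySem.Dict Int (PySem.Dict Int Int))
    = (pvPairs labels_per_bank).foldl
        (fun r p => r.modify p.1 PySem.Dict.empty (fun inner => inner.modify p.2 (0 : Int) (· + 1)))
        (PySem.Dict.empty : PySem.Dict Int (PySem.Dict Int Int)) := by
  rw [pvPairs, ← pv_foldl_flatMap]
  apply PySem.List.foldl_congr_mem
  intro r bank _
  have h1 : (PySem.List.pyRange 0 (PySem.List.len bank - 1) 1).foldl (fun routes i =>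
        let src := PySem.List.pyGetD bank i 0
        let dst := PySem.List.pyGetD bank (i + 1) 0
        if src ≠ dst then
          routes.modify src PySem.Dict.empty (fun inner => inner.modify dst (0 : Int) (· + 1))
        else routes) r
      = ((PySem.List.pyRange 0 (PySem.List.len bank - 1) 1).map
          (fun i => (PySem.List.pyGetD bank i 0, PySem.List.pyGetD bank (i + 1) 0))).foldl
          (fun routes p =>
            if p.1 ≠ p.2 then
              routes.modify p.1 PySem.Dict.empty (fun inner => inner.modify p.2 (0 : Int) (· + 1))
            else routes) r := by
    rw [List.foldl_map]
  rw [h1, pv_zip_adj, PySem.List.foldl_ite_eq_foldl_filter]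
  congr 1
  apply List.filter_congr
  intro p _
  by_cases h : p.1 = p.2 <;> simp [h]

-- B's inner dedup loop collects the distinct dst's at source s, in first-occurrence order
lemma pv_dsts (s : Int) (P : List (Int × Int)) : ∀ (acc : List Int),
    P.foldl (fun dsts q => if q.1 = s ∧ q.2 ∉ dsts then dsts ++ [q.2] else dsts) acc
      = PySem.Set.update acc ((P.filter (fun p => p.1 == s)).map Prod.snd) := by
  induction P with
  | nil => intro acc; rfl
  | cons q t ih =>
    intro acc
    simp only [List.foldl_cons, List.filter_cons]
    by_cases h1 : q.1 = s
    · have hb : (q.1 == s) = true := by simp [h1]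
      rw [hb]
      simp only [if_pos trivial, List.map_cons, PySem.Set.update_cons]
      by_cases h2 : q.2 ∈ acc
      · rw [if_neg (by simp [h2]), PySem.Set.add_of_mem h2, ih]
      · rw [if_pos ⟨h1, h2⟩, PySem.Set.add_of_not_mem h2, ih]
    · have hb : (q.1 == s) = false := by simp [h1]
      rw [hb]
      simp only [Bool.false_eq_true, if_false]
      rw [if_neg (fun h => h1 h.1), ih]

-- B's outer skip-or-insert loop, for a value depending only on the key: its items list is the
-- first-occurrence dedup of the sources, each paired with its value
lemma pv_scan_items (F : Int → List (Int × Int)) (P : List (Int × Int)) :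
    ∀ (d : PySem.Dict Int (List (Int × Int))), d.keys.Nodup →
      d.items = d.keys.map (fun s => (s, F s)) →
      (P.foldl (fun res p => if res.contains p.1 then res else res.insert p.1 (F p.1)) d).items
        = (PySem.Set.update d.keys (P.map Prod.fst)).map (fun s => (s, F s)) := by
  induction P with
  | nil => intro d _ hi; simpa [PySem.Set.update] using hi
  | cons p t ih =>
    intro d hnd hi
    simp only [List.foldl_cons, List.map_cons, PySem.Set.update_cons]
    cases hc : d.contains p.1 with
    | true =>
      rw [if_pos rfl, PySem.Set.add_of_mem ((PySem.Dict.contains_iff_mem_keys d p.1).1 hc)]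
      exact ih d hnd hi
    | false =>
      have hmem : p.1 ∉ d.keys := fun h =>
        absurd ((PySem.Dict.contains_iff_mem_keys d p.1).2 h) (by simp [hc])
      have hk := PySem.Dict.keys_insert_of_not_contains d (F p.1) hc
      rw [if_neg (by simp), PySem.Set.add_of_not_mem hmem, ← hk]
      refine ih _ ?_ ?_
      · rw [hk]
        exact hnd.append (List.nodup_singleton _) (by simpa using hmem)
      · rw [PySem.Dict.items_insert_of_not_contains d _ hc, hk, List.map_append, hi]
        rfl

-- the per-source value B computes (named so the scan lemma can abstract it)
def pvFb (P : List (Int × Int)) (s : Int) : List (Int × Int) :=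
  PySem.List.slice (PySem.List.sorted
    ((P.foldl (fun dsts q => if q.1 = s ∧ q.2 ∉ dsts then dsts ++ [q.2] else dsts) []).map
      (fun d => (d, (PySem.List.count P (s, d) : Int)))) (fun x => -x.2) false) none (some 16)

-- ===== VERDICT (by name: the statement is the Claim_ definition above) =====
theorem learn_routes_spec : Claim_equal_learn_routes := by
  intro lpb n _
  unfold Spec_learn_routes
  simp only [learn_routes, learn_routes_alt]
  have hflat : lpb.flatMap (fun bank =>
      (bank.zip (PySem.List.slice bank (some 1) none)).filter (fun p => p.1 != p.2)) = pvPairs lpb := by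
    unfold pvPairs
    congr 1
    funext bank
    rw [PySem.List.slice_from_one]
  rw [hflat, pv_routes_eq]
  set P := pvPairs lpb with hP
  set R := P.foldl
      (fun r p => r.modify p.1 PySem.Dict.empty (fun inner => inner.modify p.2 (0 : Int) (· + 1)))
      (PySem.Dict.empty : PySem.Dict Int (PySem.Dict Int Int)) with hRdef
  -- A's side: items of the truncation loop = per-source map over R's items
  have hndR : R.keys.Nodup := by
    rw [hRdef]
    exact PySem.Dict.nodup_keys_foldl_modify_key P Prod.fst PySem.Dict.empty
      (fun _ p => fun inner => inner.modify p.2 (0 : Int) (· + 1)) _ PySem.Dict.nodup_keys_empty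
  have hndR' : (R.items.map Prod.fst).Nodup := by simpa [PySem.Dict.keys] using hndR
  have hA : (R.items.foldl (fun cr sd =>
        cr.insert sd.1 (PySem.List.slice (PySem.List.sorted sd.2.items (fun x => -x.2) false) none (some 16)))
        (PySem.Dict.empty : PySem.Dict Int (List (Int × Int)))).items
      = (PySem.Dict.empty : PySem.Dict Int (List (Int × Int))).items
          ++ R.items.map (fun sd =>
            (sd.1, PySem.List.slice (PySem.List.sorted sd.2.items (fun x => -x.2) false) none (some 16))) :=
    PySem.Dict.items_foldl_insert_fresh R.items Prod.fst
      (fun sd => PySem.List.slice (PySem.List.sorted sd.2.items (fun x => -x.2) false) none (some 16))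
      PySem.Dict.empty (fun a _ => PySem.Dict.contains_empty _) hndR'
  rw [hA]
  -- canonicalise R.items
  have hkR : R.keys = PySem.Set.ofList (P.map Prod.fst) := by
    rw [hRdef, PySem.Dict.keys_foldl_modify_key, PySem.Dict.keys_empty, PySem.Set.update_nil_left]
  have hRitems : R.items = (PySem.Set.ofList (P.map Prod.fst)).map
      (fun s => (s, PySem.Dict.counter ((P.filter (fun p => p.1 == s)).map Prod.snd))) := by
    rw [PySem.Dict.items_eq_map_keys R hndR PySem.Dict.empty, hkR]
    apply List.map_congr_left
    intro s _
    congr 1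
    rw [hRdef, pv_getD_foldl_modify_key P Prod.fst PySem.Dict.empty
          (fun p => fun inner => inner.modify p.2 (0 : Int) (· + 1)) PySem.Dict.empty s,
        PySem.Dict.getD_empty, PySem.Dict.counter_eq_foldl, List.foldl_map]
  -- B's side: the scan loop over P
  have hB : (List.foldl (fun (result : PySem.Dict Int (List (Int × Int))) (p : Int × Int) =>
        if result.contains p.1 then result
        else result.insert p.1 (PySem.List.slice (PySem.List.sorted
          ((List.foldl (fun dsts q => if q.1 = p.1 ∧ q.2 ∉ dsts then dsts ++ [q.2] else dsts) [] P).map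
            (fun d => (d, (PySem.List.count P (p.1, d) : Int)))) (fun x => -x.2) false) none (some 16)))
        PySem.Dict.empty P).items
      = (PySem.Set.ofList (P.map Prod.fst)).map (fun s => (s, pvFb P s)) := by
    have h := pv_scan_items (pvFb P) P PySem.Dict.empty PySem.Dict.nodup_keys_empty rfl
    rwa [PySem.Dict.keys_empty, PySem.Set.update_nil_left] at h
  rw [hB, hRitems, List.map_map,
    show (PySem.Dict.empty : PySem.Dict Int (List (Int × Int))).items = [] from rfl,
    List.nil_append]
  apply List.map_congr_left
  intro s _
  simp only [Function.comp]
  have hinner : (List.foldl (fun dsts q => if q.1 = s ∧ q.2 ∉ dsts then dsts ++ [q.2] else dsts) [] P).map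
        (fun d => (d, (PySem.List.count P (s, d) : Int)))
      = (PySem.Dict.counter ((P.filter (fun p => p.1 == s)).map Prod.snd)).items := by
    rw [pv_dsts s P [], PySem.Set.update_nil_left, PySem.Dict.items_counter]
    apply List.map_congr_left
    intro d _
    simp only [PySem.List.count, pv_count_pair P s d]
  simp only [pvFb, hinner]
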